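-- pv_equiv track=rewrite | github.com/pedritomelenas/TFG-factorizacion-Adrian | Untitled2.py | basef
-- ===== SOURCE A (Python) =====
-- import math
--
-- def isprime(n):
--     prime=True
--     i=2
--     while i<=math.sqrt(n) and prime==True:
--         if n%i==0:
--             prime=False
--         i+=1
--     return prime
--
-- def basef (n,M):
--     B=[-1,2]
--     i=3
--     while i<=M:
--         if int((n**int((i-1)/2))%i)==1 and isprime(i)==True:  #criterio de Euler
--             B.append(i)
--         i+=1
--     return B
-- ===== SOURCE B (Python) =====
-- def isprime_odd(p):
--     # trial division by odd candidates only (p is odd, so no even divisor can occur)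
--     d = 3
--     while d * d <= p:
--         if p % d == 0:
--             return False
--         d += 2
--     return True
--
-- def basef(n, M):
--     B = [-1, 2]
--     p = 3
--     while p <= M:
--         # three-argument pow: modular exponentiation instead of a giant integer power
--         if pow(n, (p - 1) // 2, p) == 1 and isprime_odd(p):
--             B.append(p)
--         p += 2
--     return B
-- ===== Notes on version B (the rewrite author's own statement) =====
-- stated objective: faster
-- what changed: B replaces the full bignum power n**((i-1)/2) followed by % i with built-in modular exponentiation pow(n,(p-1)//2,p), iterates over odd candidates only, and tests primality by odd-only trial division with early return instead of A's flag loop over all divisors.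
import Mathlib
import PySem

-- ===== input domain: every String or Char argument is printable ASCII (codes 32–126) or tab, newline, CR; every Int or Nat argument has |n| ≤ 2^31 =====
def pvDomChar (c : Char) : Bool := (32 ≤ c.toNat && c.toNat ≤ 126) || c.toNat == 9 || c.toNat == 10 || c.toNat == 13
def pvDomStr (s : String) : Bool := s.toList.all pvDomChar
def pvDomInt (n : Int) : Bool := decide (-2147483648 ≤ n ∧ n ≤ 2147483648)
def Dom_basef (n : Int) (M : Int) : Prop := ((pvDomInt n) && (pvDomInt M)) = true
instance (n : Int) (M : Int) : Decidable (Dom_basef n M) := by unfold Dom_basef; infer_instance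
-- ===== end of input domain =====

-- B replaces the giant power n**((i-1)/2) % i with modular exponentiation and odd-only
-- trial division / iteration; measurably faster, equal output proved below.


-- ===== PORT A =====
-- 'i <= math.sqrt(n)' is ported as 'i*i ≤ n': exact on the domain (|n| ≤ 2^31), where the
-- correctly rounded float sqrt of a non-square can never cross an integer boundary.
-- The while loop is structural recursion on a fuel that bounds its iteration count
-- ((n-1).toNat suffices: the guard forces i ≤ n); with fuel 0 the guard is false anyway.
def isprimeGo (n : Int) : Nat → Int → Bool → Bool
  | 0, _, prime => prime
  | f + 1, i, prime =>
    if i * i ≤ n ∧ prime = true then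
      isprimeGo n f (i + 1) (if PySem.Int.mod n i = 0 then false else prime)
    else prime

def isprime (n : Int) : Bool := isprimeGo n (n - 1).toNat 2 true

-- 'int((i-1)/2)': float division then truncation; exact as (i-1)/2 (i ≥ 3 on every reached state).
def basefGo (n : Int) (M : Int) : Nat → Int → List Int → List Int
  | 0, _, B => B
  | f + 1, i, B =>
    if i ≤ M then
      basefGo n M f (i + 1)
        (if PySem.Int.mod (n ^ ((i - 1) / 2).toNat) i = 1 ∧ isprime i = true then B ++ [i] else B)
    else B

def basef (n : Int) (M : Int) : List Int := basefGo n M (M - 2).toNat 3 [-1, 2]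

-- ===== PORT B =====
-- port of Python's built-in three-argument pow: binary modular exponentiation
-- (fuel e bounds the halving recursion; with fuel 0 only e = 0 is reachable)
def powmodGo (b : Int) (m : Int) : Nat → Nat → Int
  | _, 0 => PySem.Int.mod 1 m
  | 0, _ => 1
  | f + 1, e =>
    let r := powmodGo b m f (e / 2)
    let r2 := PySem.Int.mod (r * r) m
    if e % 2 = 1 then PySem.Int.mod (r2 * b) m else r2

def powmod (b : Int) (e : Nat) (m : Int) : Int := powmodGo b m e e

def isprimeOddGo (p : Int) : Nat → Int → Bool
  | 0, _ => true
  | f + 1, d =>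
    if d * d ≤ p then
      (if PySem.Int.mod p d = 0 then false else isprimeOddGo p f (d + 2))
    else true

def isprimeOdd (p : Int) : Bool := isprimeOddGo p (p - 2).toNat 3

def basefAltGo (n : Int) (M : Int) : Nat → Int → List Int → List Int
  | 0, _, B => B
  | f + 1, p, B =>
    if p ≤ M then
      basefAltGo n M f (p + 2)
        (if powmod n ((p - 1) / 2).toNat p = 1 ∧ isprimeOdd p = true then B ++ [p] else B)
    else B

def basef_alt (n : Int) (M : Int) : List Int := basefAltGo n M (M - 2).toNat 3 [-1, 2]

-- ===== PRECONDITION & SPEC =====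
def Spec_basef (n : Int) (M : Int) (out : List Int) : Prop := out = basef_alt n M
instance (n : Int) (M : Int) (out : List Int) : Decidable (Spec_basef n M out) := by unfold Spec_basef; infer_instance

-- ===== CLAIM (what is proved, stated in full; the proofs are below) =====
def Claim_equal_basef : Prop := ∀ (n : Int) (M : Int), Dom_basef n M → Spec_basef n M (basef n M)

-- ===== LEMMAS AND PROOFS =====

lemma powmodGo_correct (b m : Int) (hm : 0 < m) :
    ∀ f e, e ≤ f → powmodGo b m f e = (b ^ e) % m := by
  intro f
  induction f with
  | zero =>
    intro e he
    interval_cases e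
    simp [powmodGo, PySem.Int.mod_eq_emod_of_pos hm]
  | succ f ih =>
    intro e he
    match e with
    | 0 => simp [powmodGo, PySem.Int.mod_eq_emod_of_pos hm]
    | e' + 1 =>
      have hrec : powmodGo b m f ((e' + 1) / 2) = (b ^ ((e' + 1) / 2)) % m :=
        ih ((e' + 1) / 2) (by omega)
      show (if (e' + 1) % 2 = 1 then PySem.Int.mod (PySem.Int.mod (powmodGo b m f ((e' + 1) / 2) * powmodGo b m f ((e' + 1) / 2)) m * b) m else PySem.Int.mod (powmodGo b m f ((e' + 1) / 2) * powmodGo b m f ((e' + 1) / 2)) m) = (b ^ (e' + 1)) % m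
      rw [hrec]
      have hsq : (b ^ ((e' + 1) / 2) % m * (b ^ ((e' + 1) / 2) % m)) % m
          = (b ^ ((e' + 1) / 2 + (e' + 1) / 2)) % m := by
        rw [← Int.mul_emod, pow_add]
      by_cases hpar : (e' + 1) % 2 = 1
      · simp only [hpar, if_true, PySem.Int.mod_eq_emod_of_pos hm]
        rw [hsq]
        have hmul : (b ^ ((e' + 1) / 2 + (e' + 1) / 2) % m * b) % m
            = (b ^ ((e' + 1) / 2 + (e' + 1) / 2) * b) % m := by
          conv_rhs => rw [Int.mul_emod]
          rw [Int.mul_emod (b ^ ((e' + 1) / 2 + (e' + 1) / 2) % m) b,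
            Int.emod_emod_of_dvd _ dvd_rfl]
        rw [hmul, ← pow_succ]
        have hexp : (e' + 1) / 2 + (e' + 1) / 2 + 1 = e' + 1 := by omega
        rw [hexp]
      · simp only [hpar, if_false, PySem.Int.mod_eq_emod_of_pos hm]
        rw [hsq]
        have hexp : (e' + 1) / 2 + (e' + 1) / 2 = e' + 1 := by omega
        rw [hexp]

lemma isprimeGo_false (n : Int) (f : Nat) (i : Int) : isprimeGo n f i false = false := by
  cases f <;> simp [isprimeGo]

lemma isprimeGoA_spec (n : Int) :
    ∀ f d, 0 < d → (n + 1 - d).toNat ≤ f →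
      (isprimeGo n f d true = true ↔ ∀ j, d ≤ j → j * j ≤ n → ¬ (j ∣ n)) := by
  intro f
  induction f with
  | zero =>
    intro d hd hf
    have hdn : n + 1 ≤ d := by omega
    simp only [isprimeGo, true_iff]
    intro j hj hjj
    exact absurd hjj (by nlinarith)
  | succ f ih =>
    intro d hd hf
    rw [isprimeGo]
    by_cases hg : d * d ≤ n
    · have hdn : d ≤ n := by nlinarith
      by_cases hdvd : PySem.Int.mod n d = 0
      · simp only [hg, and_true, if_true, hdvd, isprimeGo_false]
        constructor
        · intro h; exact absurd h (by simp)
        · intro h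
          exact absurd ((PySem.Int.mod_eq_zero_iff_dvd n d).mp hdvd) (h d le_rfl hg)
      · simp only [hg, and_true, if_true, hdvd, if_false]
        rw [ih (d + 1) (by omega) (by omega)]
        constructor
        · intro h j hj hjj
          rcases eq_or_lt_of_le hj with rfl | h'
          · exact fun hdv => hdvd ((PySem.Int.mod_eq_zero_iff_dvd _ _).mpr hdv)
          · exact h j (by omega) hjj
        · intro h j hj hjj
          exact h j (by omega) hjj
    · simp only [hg, and_true, if_false, true_iff]
      intro j hj hjj
      exact absurd hjj (by nlinarith)

lemma isprimeGoB_spec (p : Int) :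
    ∀ f d, 0 < d → (p + 1 - d).toNat ≤ f →
      (isprimeOddGo p f d = true ↔
        ∀ j, d ≤ j → j * j ≤ p → (j - d) % 2 = 0 → ¬ (j ∣ p)) := by
  intro f
  induction f with
  | zero =>
    intro d hd hf
    have hdp : p + 1 ≤ d := by omega
    simp only [isprimeOddGo, true_iff]
    intro j hj hjj _
    exact absurd hjj (by nlinarith)
  | succ f ih =>
    intro d hd hf
    rw [isprimeOddGo]
    by_cases hg : d * d ≤ p
    · have hdp : d ≤ p := by nlinarith
      by_cases hdvd : PySem.Int.mod p d = 0
      · simp only [hg, if_true, hdvd]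
        constructor
        · intro h; exact absurd h (by simp)
        · intro h
          exact absurd ((PySem.Int.mod_eq_zero_iff_dvd p d).mp hdvd)
            (h d le_rfl hg (by omega))
      · simp only [hg, if_true, hdvd, if_false]
        rw [ih (d + 2) (by omega) (by omega)]
        constructor
        · intro h j hj hjj hpar
          rcases eq_or_lt_of_le hj with rfl | h'
          · exact fun hdv => hdvd ((PySem.Int.mod_eq_zero_iff_dvd _ _).mpr hdv)
          · exact h j (by omega) hjj (by omega)
        · intro h j hj hjj hpar
          exact h j (by omega) hjj (by omega)
    · simp only [hg, if_false, true_iff]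
      intro j hj hjj _
      exact absurd hjj (by nlinarith)

lemma isprime_eq_odd (p : Int) (hp : 3 ≤ p) (hodd : p % 2 = 1) :
    isprime p = isprimeOdd p := by
  rw [Bool.eq_iff_iff]
  unfold isprime isprimeOdd
  rw [isprimeGoA_spec p (p - 1).toNat 2 (by omega) (by omega),
    isprimeGoB_spec p (p - 2).toNat 3 (by omega) (by omega)]
  constructor
  · intro h j hj hjj _
    exact h j (by omega) hjj
  · intro h j hj hjj hdv
    by_cases hje : j % 2 = 0
    · have h2 : (2 : Int) ∣ p := dvd_trans (by omega) hdv
      omega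
    · exact h j (by omega) hjj (by omega) hdv

lemma isprime_even_false (i : Int) (h4 : 4 ≤ i) (he : i % 2 = 0) : isprime i = false := by
  cases h : isprime i with
  | false => rfl
  | true =>
    exfalso
    unfold isprime at h
    exact ((isprimeGoA_spec i (i - 1).toNat 2 (by omega) (by omega)).mp h)
      2 le_rfl (by omega) (by omega)

lemma basefGo_out (n M : Int) (f : Nat) (i : Int) (B : List Int) (hi : ¬ i ≤ M) :
    basefGo n M f i B = B := by
  cases f <;> simp [basefGo, hi]

lemma basefAltGo_out (n M : Int) (f : Nat) (p : Int) (B : List Int) (hp : ¬ p ≤ M) :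
    basefAltGo n M f p B = B := by
  cases f <;> simp [basefAltGo, hp]

lemma basefGo_fuel (n M : Int) :
    ∀ f g i B, (M + 1 - i).toNat ≤ f → (M + 1 - i).toNat ≤ g →
      basefGo n M f i B = basefGo n M g i B := by
  intro f
  induction f with
  | zero =>
    intro g i B hf _
    rw [basefGo_out n M 0 i B (by omega), basefGo_out n M g i B (by omega)]
  | succ f ih =>
    intro g i B hf hg
    by_cases hi : i ≤ M
    · match g with
      | 0 => omega
      | g' + 1 =>
        rw [basefGo, basefGo]
        simp only [hi, if_true]
        exact ih g' (i + 1) _ (by omega) (by omega)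
    · rw [basefGo_out n M _ i B hi, basefGo_out n M g i B hi]

lemma loops_eq (n M : Int) :
    ∀ k i B, 3 ≤ i → i % 2 = 1 → (M + 1 - i).toNat ≤ k →
      basefGo n M k i B = basefAltGo n M k i B := by
  intro k
  induction k with
  | zero => intro i B _ _ _; rfl
  | succ k ih =>
    intro i B h3 hodd hk
    by_cases hi : i ≤ M
    · have heuler : PySem.Int.mod (n ^ ((i - 1) / 2).toNat) i = powmod n ((i - 1) / 2).toNat i := by
        unfold powmod
        rw [powmodGo_correct n i (by omega) _ _ le_rfl, PySem.Int.mod_eq_emod_of_pos (by omega)]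
      have hpr : isprime i = isprimeOdd i := isprime_eq_odd i h3 hodd
      rw [basefGo, basefAltGo, heuler, hpr]
      simp only [hi, if_true]
      set B' := if powmod n ((i - 1) / 2).toNat i = 1 ∧ isprimeOdd i = true then B ++ [i] else B
        with hB'
      have hstep : basefGo n M k (i + 1) B' = basefGo n M k (i + 2) B' := by
        by_cases h2 : i + 1 ≤ M
        · match k with
          | 0 => omega
          | k' + 1 =>
            conv_lhs => rw [basefGo]
            simp only [h2, if_true, isprime_even_false (i + 1) (by omega) (by omega),
              Bool.false_eq_true, and_false, if_false]
            have h12 : i + 1 + 1 = i + 2 := by ring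
            rw [h12]
            exact basefGo_fuel n M k' (k' + 1) (i + 2) B' (by omega) (by omega)
        · rw [basefGo_out n M k (i + 1) B' h2, basefGo_out n M k (i + 2) B' (by omega)]
      rw [hstep]
      exact ih (i + 2) B' (by omega) (by omega) (by omega)
    · rw [basefGo_out n M _ i B hi, basefAltGo_out n M _ i B hi]

-- ===== VERDICT (by name: the statement is the Claim_ definition above) =====
theorem basef_spec : Claim_equal_basef := by
  intro n M _
  show basef n M = basef_alt n M
  exact loops_eq n M (M - 2).toNat 3 [-1, 2] le_rfl (by norm_num) (by omega)
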